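-- pv_equiv track=rewrite | github.com/RatnaMounica/Sharing-github | Python.py | hashwords
-- ===== SOURCE A (Python) =====
-- def hashwords(sent,Wordlist):
--     output=[]
--     terms=sent.split(' ')
--     for term in terms:
--         if term[0]=='#':#if the word starts with #
--             output.append(parse(term,Wordlist))#arsing the element
--         else:
--             output.append((term))#else appending it
--     return(output)
--
-- def parse(term,Wordlist):
--     words=[]
--     tags=term[1:].split("-")
--     for tag in tags:
--         word=find_word(tag,Wordlist)
--         while word!=None and len(tag)>0:
--             words.append(word)
--             if len(tag)==len(word):
--                 break
--             tag=tag[len(word):]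
--             word=find_word(tag,Wordlist)
--     return(" ".join(words))
--
-- def find_word(token, Wordlist):
--     i = len(token) + 1
--     while i > 1:
--         i=i-1
--         if token[:i] in Wordlist:
--             return token[:i]
--     return None
-- ===== SOURCE B (Python) =====
-- def hashwords(sent, Wordlist):
--     # Each emitted word is found by one scan of Wordlist keeping the longest
--     # list word that is a prefix of the remaining tag, instead of testing
--     # every prefix of the tag against the list.
--     return [_parse_tag(t[1:], Wordlist) if t[:1] == '#' else t
--             for t in sent.split(' ')]
--
-- def _parse_tag(body, Wordlist):
--     parts = []
--     for tag in body.split('-'):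
--         while tag:
--             best = 0
--             for w in Wordlist:
--                 if len(w) > best and tag.startswith(w):
--                     best = len(w)
--             if best == 0:
--                 break
--             parts.append(tag[:best])
--             tag = tag[best:]
--     return " ".join(parts)
-- ===== Notes on version B (the rewrite author's own statement) =====
-- stated objective: alternative
-- what changed: Instead of testing every prefix of the remaining tag for membership in Wordlist (longest first), B finds each emitted word by a single scan of Wordlist keeping the longest list word that is a prefix of the remaining tag.
import Mathlib
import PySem

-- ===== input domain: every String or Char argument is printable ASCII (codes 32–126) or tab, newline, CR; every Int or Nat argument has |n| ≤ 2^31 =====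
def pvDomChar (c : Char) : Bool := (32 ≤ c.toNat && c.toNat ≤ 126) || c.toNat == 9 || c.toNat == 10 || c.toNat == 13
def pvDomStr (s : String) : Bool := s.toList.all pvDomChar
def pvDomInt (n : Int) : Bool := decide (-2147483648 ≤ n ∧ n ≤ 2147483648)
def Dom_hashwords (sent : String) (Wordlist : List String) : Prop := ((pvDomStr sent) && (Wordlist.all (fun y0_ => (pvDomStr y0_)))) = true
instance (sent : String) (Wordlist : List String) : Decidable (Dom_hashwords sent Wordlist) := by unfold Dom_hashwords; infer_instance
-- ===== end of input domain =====

-- B replaces A's longest-first scan over all prefixes of the remaining tag (each a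
-- membership test on Wordlist) by a single scan of Wordlist keeping the longest word
-- that is a prefix of the remaining tag (same cost in the measured runs; objective: alternative).

-- ===== PORT A =====
-- find_word: i from len(token) down to 1, return token[:i] if it is in Wordlist
def pvFindGo (tok : List Char) (wl : List String) : Nat → Option (List Char)
  | 0 => none
  | i + 1 => if String.ofList (tok.take (i + 1)) ∈ wl then some (tok.take (i + 1))
             else pvFindGo tok wl i

def pvFindWord (tok : List Char) (wl : List String) : Option (List Char) :=
  pvFindGo tok wl tok.length

-- the inner 'while word!=None and len(tag)>0' loop of parse; fuel = initial tag length
-- (each iteration removes at least one character, so the fuel never runs out)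
def pvParseLoopA (wl : List String) : Nat → List Char → List (List Char) → List (List Char)
  | 0, _, acc => acc
  | fuel + 1, tag, acc =>
    match pvFindWord tag wl with
    | none => acc
    | some w =>
      if tag.length = 0 then acc
      else
        let acc' := acc ++ [w]
        if tag.length = w.length then acc'
        else pvParseLoopA wl fuel (tag.drop w.length) acc'

def pvParseA (term : List Char) (wl : List String) : String :=
  let tags := PySem.Chars.splitOn (term.drop 1) ['-']
  let words := tags.foldl (fun ws tag => pvParseLoopA wl tag.length tag ws) []
  PySem.Str.join " " (words.map String.ofList)

def hashwords (sent : String) (Wordlist : List String) : List String :=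
  (PySem.Chars.splitOn sent.toList [' ']).map (fun term =>
    match PySem.List.pyGet? term 0 with   -- term[0]; none = IndexError, excluded by Pre_
    | some c => if c = '#' then pvParseA term Wordlist else String.ofList term
    | none => String.ofList term)

-- ===== PORT B =====
-- longest word of Wordlist that is a prefix of tag (0 if none), one scan of Wordlist
def pvBestFit (wl : List String) (tag : List Char) : Nat :=
  wl.foldl (fun best w =>
    if best < w.toList.length && PySem.Chars.startswith tag w.toList then w.toList.length
    else best) 0

-- the 'while tag' loop of _parse_tag; fuel = initial tag length
def pvSegLoopB (wl : List String) : Nat → List Char → List (List Char) → List (List Char)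
  | 0, _, acc => acc
  | fuel + 1, tag, acc =>
    if tag.isEmpty then acc
    else
      let best := pvBestFit wl tag
      if best = 0 then acc
      else pvSegLoopB wl fuel (tag.drop best) (acc ++ [tag.take best])

def pvParseTagB (body : List Char) (wl : List String) : String :=
  let parts := (PySem.Chars.splitOn body ['-']).foldl
    (fun ps tag => pvSegLoopB wl tag.length tag ps) []
  PySem.Str.join " " (parts.map String.ofList)

def hashwords_alt (sent : String) (Wordlist : List String) : List String :=
  (PySem.Chars.splitOn sent.toList [' ']).map (fun t =>
    if t.take 1 = ['#'] then pvParseTagB (t.drop 1) Wordlist else String.ofList t)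

-- ===== PRECONDITION & SPEC =====
-- Python A raises IndexError (term[0]) on every empty term of sent.split(' '):
-- Pre_ requires each space-separated term of sent to be nonempty.
def Pre_hashwords (sent : String) (Wordlist : List String) : Prop :=
  ((PySem.Chars.splitOn sent.toList [' ']).all (fun t => !t.isEmpty)) = true
instance (sent : String) (Wordlist : List String) : Decidable (Pre_hashwords sent Wordlist) := by
  unfold Pre_hashwords; infer_instance

def pvWitness_hashwords : String × List String := ("#ab-c xy", ["a", "ab", "c"])

def Spec_hashwords (sent : String) (Wordlist : List String) (out : List String) : Prop :=
  out = hashwords_alt sent Wordlist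
instance (sent : String) (Wordlist : List String) (out : List String) : Decidable (Spec_hashwords sent Wordlist out) := by
  unfold Spec_hashwords; infer_instance

-- ===== CLAIM (what is proved, stated in full; the proofs are below) =====
def Claim_equal_hashwords : Prop := ∀ (sent : String) (Wordlist : List String), Dom_hashwords sent Wordlist → Pre_hashwords sent Wordlist → Spec_hashwords sent Wordlist (hashwords sent Wordlist)

-- ===== LEMMAS AND PROOFS =====

-- one step of B's fold never decreases the accumulator
theorem pvBF_step_ge (tag : List Char) (w : String) (b : Nat) :
    b ≤ (if b < w.toList.length && PySem.Chars.startswith tag w.toList then w.toList.length else b) := by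
  by_cases h : (b < w.toList.length && PySem.Chars.startswith tag w.toList) = true
  · rw [if_pos h]
    simp only [Bool.and_eq_true, decide_eq_true_eq] at h
    exact h.1.le
  · rw [if_neg h]

theorem pvBF_foldl_ge (tag : List Char) (wl : List String) :
    ∀ b : Nat, b ≤ wl.foldl (fun best w =>
      if best < w.toList.length && PySem.Chars.startswith tag w.toList then w.toList.length else best) b := by
  induction wl with
  | nil => intro b; simp
  | cons u us ih =>
    intro b
    simp only [List.foldl_cons]
    exact le_trans (pvBF_step_ge tag u b) (ih _)

-- B's fold dominates the length of every list word that is a prefix of tag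
theorem pvBF_foldl_dom (tag : List Char) (wl : List String) (w : String)
    (hw : w ∈ wl) (hsw : PySem.Chars.startswith tag w.toList = true) :
    ∀ b : Nat, w.toList.length ≤ wl.foldl (fun best v =>
      if best < v.toList.length && PySem.Chars.startswith tag v.toList then v.toList.length else best) b := by
  induction wl with
  | nil => cases hw
  | cons u us ih =>
    intro b
    simp only [List.foldl_cons]
    rcases List.mem_cons.mp hw with h | h
    · subst h
      refine le_trans ?_ (pvBF_foldl_ge tag us _)
      by_cases hb : b < w.toList.length
      · rw [if_pos (by simp only [Bool.and_eq_true, decide_eq_true_eq]; exact ⟨hb, hsw⟩)]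
      · rw [if_neg (by simp only [Bool.and_eq_true, decide_eq_true_eq, not_and]; intro h; exact absurd h hb)]
        omega
    · exact ih h _

-- B's fold yields 0 or a valid match length (a nonempty prefix of tag present in W)
theorem pvBF_foldl_valid (tag : List Char) (W : List String) :
    ∀ (wl : List String) (b : Nat), (∀ w ∈ wl, w ∈ W) →
      (b = 0 ∨ (1 ≤ b ∧ b ≤ tag.length ∧ String.ofList (tag.take b) ∈ W)) →
      (wl.foldl (fun best v =>
        if best < v.toList.length && PySem.Chars.startswith tag v.toList then v.toList.length else best) b = 0 ∨
        (1 ≤ wl.foldl (fun best v =>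
          if best < v.toList.length && PySem.Chars.startswith tag v.toList then v.toList.length else best) b ∧
         wl.foldl (fun best v =>
          if best < v.toList.length && PySem.Chars.startswith tag v.toList then v.toList.length else best) b ≤ tag.length ∧
         String.ofList (tag.take (wl.foldl (fun best v =>
          if best < v.toList.length && PySem.Chars.startswith tag v.toList then v.toList.length else best) b)) ∈ W)) := by
  intro wl
  induction wl with
  | nil => intro b _ hb; simpa using hb
  | cons u us ih =>
    intro b hmem hb
    simp only [List.foldl_cons]
    refine ih _ (fun w hw => hmem w (List.mem_cons_of_mem _ hw)) ?_
    by_cases hc : (b < u.toList.length && PySem.Chars.startswith tag u.toList) = true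
    · rw [if_pos hc]
      simp only [Bool.and_eq_true, decide_eq_true_eq] at hc
      obtain ⟨hlt, hsw⟩ := hc
      have hpre : u.toList <+: tag := (PySem.Chars.startswith_iff tag u.toList).mp hsw
      have htake : tag.take u.toList.length = u.toList := (List.prefix_iff_eq_take.mp hpre).symm
      right
      refine ⟨by omega, hpre.length_le, ?_⟩
      rw [htake, String.ofList_toList]
      exact hmem u List.mem_cons_self
    · rw [if_neg hc]; exact hb

theorem pvBestFit_valid (wl : List String) (tag : List Char) :
    pvBestFit wl tag = 0 ∨
      (1 ≤ pvBestFit wl tag ∧ pvBestFit wl tag ≤ tag.length ∧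
        String.ofList (tag.take (pvBestFit wl tag)) ∈ wl) := by
  exact pvBF_foldl_valid tag wl wl 0 (fun w hw => hw) (Or.inl rfl)

theorem pvBestFit_max (wl : List String) (tag : List Char) (i : Nat)
    (h2 : i ≤ tag.length) (h3 : String.ofList (tag.take i) ∈ wl) :
    i ≤ pvBestFit wl tag := by
  have hpre : tag.take i <+: tag := List.take_prefix i tag
  have hsw : PySem.Chars.startswith tag (String.ofList (tag.take i)).toList = true := by
    rw [String.toList_ofList]
    exact (PySem.Chars.startswith_iff tag (tag.take i)).mpr hpre
  have := pvBF_foldl_dom tag wl (String.ofList (tag.take i)) h3 hsw 0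
  rw [String.toList_ofList, List.length_take] at this
  unfold pvBestFit
  omega

-- A's descending prefix scan computes exactly B's maximal match
theorem pvFindGo_eq (wl : List String) (tag : List Char) :
    ∀ n, n ≤ tag.length → pvBestFit wl tag ≤ n →
      pvFindGo tag wl n =
        if pvBestFit wl tag = 0 then none else some (tag.take (pvBestFit wl tag)) := by
  intro n
  induction n with
  | zero =>
    intro _ hle
    have : pvBestFit wl tag = 0 := Nat.le_zero.mp hle
    simp [pvFindGo, this]
  | succ k ih =>
    intro hn hle
    by_cases hmem : String.ofList (tag.take (k + 1)) ∈ wl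
    · have hmax : k + 1 ≤ pvBestFit wl tag := pvBestFit_max wl tag (k+1) hn hmem
      have heq : pvBestFit wl tag = k + 1 := by omega
      simp [pvFindGo, hmem, heq]
    · have hne : pvBestFit wl tag ≠ k + 1 := by
        intro h
        rcases pvBestFit_valid wl tag with h0 | ⟨_, _, hm⟩
        · omega
        · rw [h] at hm; exact hmem hm
      simp only [pvFindGo, if_neg hmem]
      exact ih (by omega) (by omega)

theorem pvFindWord_eq (wl : List String) (tag : List Char) :
    pvFindWord tag wl =
      if pvBestFit wl tag = 0 then none else some (tag.take (pvBestFit wl tag)) := by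
  have hle : pvBestFit wl tag ≤ tag.length := by
    rcases pvBestFit_valid wl tag with h0 | ⟨_, h, _⟩
    · omega
    · exact h
  exact pvFindGo_eq wl tag tag.length le_rfl hle

theorem pvSegLoopB_nil (wl : List String) (fuel : Nat) (acc : List (List Char)) :
    pvSegLoopB wl fuel [] acc = acc := by
  cases fuel <;> simp [pvSegLoopB]

-- the two inner loops agree given enough fuel
theorem pvLoop_eq (wl : List String) :
    ∀ (fuel : Nat) (tag : List Char) (acc : List (List Char)), tag.length ≤ fuel →
      pvParseLoopA wl fuel tag acc = pvSegLoopB wl fuel tag acc := by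
  intro fuel
  induction fuel with
  | zero => intro tag acc _; rfl
  | succ f ih =>
    intro tag acc hlen
    rcases pvBestFit_valid wl tag with h0 | ⟨h1, h2, _⟩
    · -- no match: both return acc
      simp [pvParseLoopA, pvSegLoopB, pvFindWord_eq, h0]
    · -- match of length m ≥ 1
      set m := pvBestFit wl tag with hm
      have htagne : tag.length ≠ 0 := by omega
      have hm0 : m ≠ 0 := by omega
      have hemp : tag.isEmpty = false := by
        cases tag with
        | nil => simp at htagne
        | cons a l => rfl
      have hlentake : (tag.take m).length = m := by
        rw [List.length_take]; omega
      by_cases hfin : tag.length = m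
      · -- last word: A stops, B recurses once into the empty tag
        simp only [pvParseLoopA, pvSegLoopB, pvFindWord_eq, ← hm, if_neg hm0, hemp,
          Bool.false_eq_true, if_false, if_neg htagne]
        rw [if_pos (by rw [hlentake]; exact hfin)]
        have : tag.drop m = [] := by
          apply List.eq_nil_of_length_eq_zero
          rw [List.length_drop]; omega
        rw [this, pvSegLoopB_nil]
      · simp only [pvParseLoopA, pvSegLoopB, pvFindWord_eq, ← hm, if_neg hm0, hemp,
          Bool.false_eq_true, if_false, if_neg htagne]
        rw [if_neg (by rw [hlentake]; exact hfin), hlentake]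
        apply ih
        rw [List.length_drop]; omega

theorem pvParse_eq (term : List Char) (wl : List String) :
    pvParseA term wl = pvParseTagB (term.drop 1) wl := by
  unfold pvParseA pvParseTagB
  simp only []
  congr 2
  apply PySem.List.foldl_congr_mem
  intro ws tag _
  exact pvLoop_eq wl tag.length tag ws le_rfl

theorem hw_eq (sent : String) (Wordlist : List String) :
    hashwords sent Wordlist = hashwords_alt sent Wordlist := by
  unfold hashwords hashwords_alt
  apply List.map_congr_left
  intro term _
  cases term with
  | nil => simp [PySem.List.pyGet?]
  | cons c l =>
    by_cases hc : c = '#'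
    · simp [PySem.List.pyGet?, PySem.List.pyIdx?, hc, pvParse_eq]
    · simp [PySem.List.pyGet?, PySem.List.pyIdx?, hc]

-- ===== VERDICT (by name: the statement is the Claim_ definition above) =====
theorem hashwords_spec : Claim_equal_hashwords := by
  intro sent Wordlist _ _
  unfold Spec_hashwords
  exact hw_eq sent Wordlist
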